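-- pv_equiv track=rewrite | github.com/EleutherAI/lm-evaluation-harness | lm_eval/tasks/hendrycks_math/utils.py | all_boxed_strings
-- ===== SOURCE A (Python) =====
-- def all_boxed_strings(string):
--     """Return all \\boxed{...} substrings in order, with proper brace matching."""
--     results = []
--     idx = 0
--     while True:
--         start = string.find("\\boxed{", idx)
--         if start < 0:
--             break
--         depth = 0
--         for j in range(start, len(string)):
--             if string[j] == "{":
--                 depth += 1
--             elif string[j] == "}":
--                 depth -= 1
--                 if depth == 0:
--                     results.append(string[start : j + 1])
--                     idx = j + 1
--                     break
--         else:
--             break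
--     return results
-- ===== SOURCE B (Python) =====
-- def all_boxed_strings(string):
--     """Return all \\boxed{...} substrings in order, with proper brace matching."""
--     results = []
--     start = None
--     depth = 0
--     for i in range(len(string)):
--         if start is None:
--             if string.startswith("\\boxed{", i):
--                 start = i
--                 depth = 0
--         else:
--             ch = string[i]
--             if ch == "{":
--                 depth += 1
--             elif ch == "}":
--                 depth -= 1
--                 if depth == 0:
--                     results.append(string[start : i + 1])
--                     start = None
--     return results
-- ===== Notes on version B (the rewrite author's own statement) =====
-- stated objective: alternative
-- what changed: Replaced the restarting outer find()-loop with a nested brace-matching scan by a single flat left-to-right pass carrying a (searching | inside-box-since-start) state and a brace depth, appending a box each time the depth returns to zero.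
import Mathlib
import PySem

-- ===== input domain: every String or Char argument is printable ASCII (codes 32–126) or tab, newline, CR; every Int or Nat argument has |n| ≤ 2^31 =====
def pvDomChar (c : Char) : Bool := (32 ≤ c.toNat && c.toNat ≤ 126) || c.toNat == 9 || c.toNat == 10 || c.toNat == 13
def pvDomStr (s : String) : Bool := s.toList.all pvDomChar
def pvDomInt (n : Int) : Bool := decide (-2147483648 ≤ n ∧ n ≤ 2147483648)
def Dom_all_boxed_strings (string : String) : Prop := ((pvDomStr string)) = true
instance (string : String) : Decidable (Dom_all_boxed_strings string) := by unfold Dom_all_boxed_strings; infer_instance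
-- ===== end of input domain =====

-- B replaces A's restarting find()-loop + nested brace scan by one flat pass with a
-- (searching | inside-box) state and a depth counter (objective: alternative decomposition).

-- ===== PORT A =====

-- the 7-character needle "\boxed{"
def boxedPat : List Char := ['\\', 'b', 'o', 'x', 'e', 'd', '{']

-- hand port of string.find("\\boxed{", i): scans rest = string[i:] left to right carrying the
-- absolute index i, returning the first match position (none = Python's -1); exact because the
-- needle is nonempty, so a match at i means it is a prefix of string[i:].
def findBoxed : List Char → Nat → Option Nat
  | [], _ => none
  | c :: r, i => if boxedPat.isPrefixOf (c :: r) then some i else findBoxed r (i + 1)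

-- A's inner 'for j in range(start, len(string))' brace loop, scanning rest = string[j:] with the
-- absolute index j; returns the j at which depth returns to 0 (the loop's break position),
-- none if the for-loop exhausts the string (Python's for-else).
def innerScan : List Char → Nat → Int → Option Nat
  | [], _, _ => none
  | c :: r, j, depth =>
    if c = '{' then innerScan r (j + 1) (depth + 1)
    else if c = '}' then
      if depth - 1 = 0 then some j else innerScan r (j + 1) (depth - 1)
    else innerScan r (j + 1) depth

-- A's 'while True' loop: find the next "\boxed{" at or after idx, brace-match from there,
-- append string[start : j+1] (= (take (j+1)).drop start, exact since 0 ≤ start ≤ j+1 ≤ len),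
-- and resume the find at j+1.  The fuel counter only makes the recursion structural: each
-- iteration moves idx past the closing brace, so length+1 iterations always suffice.
def outerA (cs : List Char) : Nat → Nat → List String → List String
  | 0, _, acc => acc
  | fuel + 1, idx, acc =>
    match findBoxed (cs.drop idx) idx with
    | none => acc
    | some s =>
      match innerScan (cs.drop s) s 0 with
      | none => acc
      | some e => outerA cs fuel (e + 1) (acc ++ [String.ofList ((cs.take (e + 1)).drop s)])

def all_boxed_strings (string : String) : List String :=
  outerA string.toList (string.toList.length + 1) 0 []

-- ===== PORT B =====

-- B's single 'for i in range(len(string))' state machine, scanning rest = string[i:] with the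
-- absolute index i (c is string[i]): start = none means searching (string.startswith("\boxed{", i)
-- = the needle is a prefix of string[i:]), start = some s means inside a box opened at s,
-- tracking brace depth; when depth returns to 0 append string[s : i+1].
def bLoop (cs : List Char) : List Char → Nat → Option Nat → Int → List String → List String
  | [], _, _, _, acc => acc
  | c :: r, i, none, depth, acc =>
    if boxedPat.isPrefixOf (c :: r) then bLoop cs r (i + 1) (some i) 0 acc
    else bLoop cs r (i + 1) none depth acc
  | c :: r, i, some s, depth, acc =>
    if c = '{' then bLoop cs r (i + 1) (some s) (depth + 1) acc
    else if c = '}' then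
      if depth - 1 = 0 then
        bLoop cs r (i + 1) none (depth - 1) (acc ++ [String.ofList ((cs.take (i + 1)).drop s)])
      else bLoop cs r (i + 1) (some s) (depth - 1) acc
    else bLoop cs r (i + 1) (some s) depth acc

def all_boxed_strings_alt (string : String) : List String :=
  bLoop string.toList string.toList 0 none 0 []

-- ===== PRECONDITION & SPEC =====
def Spec_all_boxed_strings (string : String) (out : List String) : Prop := out = all_boxed_strings_alt string
instance (string : String) (out : List String) : Decidable (Spec_all_boxed_strings string out) := by unfold Spec_all_boxed_strings; infer_instance

-- ===== CLAIM (what is proved, stated in full; the proofs are below) =====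
def Claim_equal_all_boxed_strings : Prop := ∀ (string : String), Dom_all_boxed_strings string → Spec_all_boxed_strings string (all_boxed_strings string)

-- ===== LEMMAS AND PROOFS =====

-- bounds needed by outerA's termination
theorem findBoxed_le {rest : List Char} : ∀ {i s : Nat}, findBoxed rest i = some s →
    i ≤ s ∧ s - i < rest.length := by
  induction rest with
  | nil => intro i s h; simp [findBoxed] at h
  | cons c r ih =>
    intro i s h
    rw [findBoxed] at h
    split_ifs at h with hp
    · cases h; simp
    · have := ih h
      simp only [List.length_cons]
      omega

theorem innerScan_le {rest : List Char} : ∀ {j e : Nat} {d : Int}, innerScan rest j d = some e →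
    j ≤ e ∧ e - j < rest.length := by
  induction rest with
  | nil => intro j e d h; simp [innerScan] at h
  | cons c r ih =>
    intro j e d h
    rw [innerScan] at h
    split_ifs at h with h1 h2 h3
    · have := ih h; simp only [List.length_cons]; omega
    · cases h; simp
    · have := ih h; simp only [List.length_cons]; omega
    · have := ih h; simp only [List.length_cons]; omega

-- a prefix match needs 7 characters of room
theorem prefix_room {cs : List Char} {k : Nat} (h : boxedPat.isPrefixOf (cs.drop k)) :
    k + 7 ≤ cs.length := by
  have := (List.isPrefixOf_iff_prefix.mp h).length_le
  simp [boxedPat] at this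
  omega

-- findBoxed = none means: no match anywhere at or after i
theorem findBoxed_none (cs : List Char) :
    ∀ n i, cs.length - i < n → findBoxed (cs.drop i) i = none →
      ∀ k, i ≤ k → ¬ boxedPat.isPrefixOf (cs.drop k) := by
  intro n
  induction n with
  | zero => intro i h; omega
  | succ n ih =>
    intro i hn h k hk hkp
    by_cases hl : i < cs.length
    · rw [List.drop_eq_getElem_cons hl, findBoxed] at h
      split_ifs at h with hp
      rcases Nat.eq_or_lt_of_le hk with rfl | hlt
      · exact hp (by rwa [List.drop_eq_getElem_cons hl] at hkp)
      · exact ih (i + 1) (by omega) h k hlt hkp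
    · have := prefix_room hkp
      omega

-- findBoxed's result is a match, and the first one at or after i
theorem findBoxed_min (cs : List Char) :
    ∀ n i s, cs.length - i < n → findBoxed (cs.drop i) i = some s →
      boxedPat.isPrefixOf (cs.drop s) ∧
        ∀ k, i ≤ k → k < s → ¬ boxedPat.isPrefixOf (cs.drop k) := by
  intro n
  induction n with
  | zero => intro i s h; omega
  | succ n ih =>
    intro i s hn h
    by_cases hl : i < cs.length
    · rw [List.drop_eq_getElem_cons hl, findBoxed] at h
      split_ifs at h with hp
      · cases h
        refine ⟨by rwa [List.drop_eq_getElem_cons hl], ?_⟩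
        intro k hk hks
        omega
      · obtain ⟨h1, h2⟩ := ih (i + 1) s (by omega) h
        refine ⟨h1, ?_⟩
        intro k hk hks hkp
        rcases Nat.eq_or_lt_of_le hk with rfl | hlt
        · exact hp (by rwa [List.drop_eq_getElem_cons hl] at hkp)
        · exact h2 k hlt hks hkp
    · rw [List.drop_eq_nil_of_le (by omega)] at h
      simp [findBoxed] at h

-- no match at or after i ⇒ B's searching mode runs to the end unchanged
theorem bLoop_none_end (cs : List Char) :
    ∀ n i d acc, cs.length - i < n → (∀ k, i ≤ k → ¬ boxedPat.isPrefixOf (cs.drop k)) →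
      bLoop cs (cs.drop i) i none d acc = acc := by
  intro n
  induction n with
  | zero => intro i d acc h; omega
  | succ n ih =>
    intro i d acc hn hno
    by_cases hl : i < cs.length
    · have hni := hno i le_rfl
      rw [List.drop_eq_getElem_cons hl] at hni ⊢
      rw [bLoop, if_neg hni]
      exact ih (i + 1) d acc (by omega) (fun k hk => hno k (by omega))
    · rw [List.drop_eq_nil_of_le (by omega), bLoop]

-- no match in [i, s) ⇒ B's searching mode walks from i to s
theorem bLoop_skip (cs : List Char) :
    ∀ m i s d acc, s - i < m → i ≤ s → s ≤ cs.length →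
      (∀ k, i ≤ k → k < s → ¬ boxedPat.isPrefixOf (cs.drop k)) →
      bLoop cs (cs.drop i) i none d acc = bLoop cs (cs.drop s) s none d acc := by
  intro m
  induction m with
  | zero => intro i s d acc h; omega
  | succ m ih =>
    intro i s d acc hm his hs hno
    rcases Nat.eq_or_lt_of_le his with rfl | hlt
    · rfl
    · have hl : i < cs.length := by omega
      have hni := hno i le_rfl hlt
      rw [List.drop_eq_getElem_cons hl] at hni ⊢
      rw [bLoop, if_neg hni]
      exact ih (i + 1) s d acc (by omega) (by omega) hs (fun k hk => hno k (by omega))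

-- B's inside-box mode computes exactly A's inner brace scan
theorem bLoop_box (cs : List Char) :
    ∀ n j s d acc, cs.length - j < n →
      bLoop cs (cs.drop j) j (some s) d acc =
        match innerScan (cs.drop j) j d with
        | none => acc
        | some e =>
          bLoop cs (cs.drop (e + 1)) (e + 1) none 0
            (acc ++ [String.ofList ((cs.take (e + 1)).drop s)]) := by
  intro n
  induction n with
  | zero => intro j s d acc h; omega
  | succ n ih =>
    intro j s d acc hn
    by_cases hl : j < cs.length
    · rw [List.drop_eq_getElem_cons hl, bLoop, innerScan]
      split_ifs with hbrace hclose hzero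
      · exact ih (j + 1) s (d + 1) acc (by omega)
      · dsimp only
        rw [hzero]
      · exact ih (j + 1) s (d - 1) acc (by omega)
      · exact ih (j + 1) s d acc (by omega)
    · rw [List.drop_eq_nil_of_le (by omega), bLoop, innerScan]

-- a match at s starts with a backslash, so A's inner scan skips position s
theorem innerScan_start {cs : List Char} {s : Nat} (hp : boxedPat.isPrefixOf (cs.drop s))
    (hs : s < cs.length) : innerScan (cs.drop s) s 0 = innerScan (cs.drop (s + 1)) (s + 1) 0 := by
  have hch : cs[s] = '\\' := by
    obtain ⟨t, ht⟩ := List.isPrefixOf_iff_prefix.mp hp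
    have hd : cs.drop s = boxedPat ++ t := ht.symm
    have h0 : (cs.drop s)[0]'(by rw [hd]; simp [boxedPat]) = '\\' := by
      simp [hd, boxedPat]
    rw [List.getElem_drop] at h0
    simpa using h0
  rw [List.drop_eq_getElem_cons hs, innerScan, hch]
  rw [if_neg (by decide), if_neg (by decide)]

-- main induction: A's outer loop from idx equals B's searching mode from idx
theorem main_eq (cs : List Char) :
    ∀ fuel idx d acc, cs.length - idx < fuel → idx ≤ cs.length →
      outerA cs fuel idx acc = bLoop cs (cs.drop idx) idx none d acc := by
  intro fuel
  induction fuel with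
  | zero => intro idx d acc h; omega
  | succ n ih =>
    intro idx d acc hn hidx
    rw [outerA]
    cases hf : findBoxed (cs.drop idx) idx with
    | none =>
      exact (bLoop_none_end cs (cs.length - idx + 1) idx d acc (by omega)
        (findBoxed_none cs (cs.length - idx + 1) idx (by omega) hf)).symm
    | some s =>
      have hb := findBoxed_le hf
      have hsl : s < cs.length := by
        simp only [List.length_drop] at hb
        omega
      have hm := findBoxed_min cs (cs.length - idx + 1) idx s (by omega) hf
      dsimp only
      rw [bLoop_skip cs (s - idx + 1) idx s d acc (by omega) hb.1 (by omega) hm.2]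
      have hps := hm.1
      rw [List.drop_eq_getElem_cons hsl, bLoop,
        if_pos (by rwa [List.drop_eq_getElem_cons hsl] at hps), ← List.drop_eq_getElem_cons hsl]
      rw [bLoop_box cs (cs.length - (s + 1) + 1) (s + 1) s 0 acc (by omega)]
      rw [← innerScan_start hm.1 hsl]
      cases hi : innerScan (cs.drop s) s 0 with
      | none => rfl
      | some e =>
        have he := innerScan_le hi
        simp only [List.length_drop] at he
        dsimp only
        exact ih (e + 1) 0 (acc ++ [String.ofList ((cs.take (e + 1)).drop s)])
          (by omega) (by omega)

-- ===== VERDICT (by name: the statement is the Claim_ definition above) =====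
theorem all_boxed_strings_spec : Claim_equal_all_boxed_strings := by
  intro string _
  unfold Spec_all_boxed_strings all_boxed_strings all_boxed_strings_alt
  have h := main_eq string.toList (string.toList.length + 1) 0 0 [] (by omega) (by omega)
  simpa using h
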